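-- pv_equiv track=rewrite | github.com/JamieAHerron/launch-school-core-curriculum | PY110/exercises/easy_1/running_totals.py | running_total
-- ===== SOURCE A (Python) =====
-- def running_total(numbers):
--     result = []
--
--     for i in range(len(numbers)):
--         if not result:
--             result.append(numbers[i])
--         else:
--             result.append(numbers[i] + result[i - 1])
--
--     return result
-- ===== SOURCE B (Python) =====
-- def running_total(numbers):
--     if len(numbers) <= 1:
--         return numbers[:]
--     mid = len(numbers) // 2
--     left = running_total(numbers[:mid])
--     right = running_total(numbers[mid:])
--     offset = left[-1]
--     return left + [offset + t for t in right]
-- ===== Notes on version B (the rewrite author's own statement) =====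
-- stated objective: alternative
-- what changed: B computes the prefix sums by divide and conquer: it splits the list at the midpoint, recursively builds the running totals of each half, and shifts the right half by the left half's final total, instead of A's single left-to-right pass that appends numbers[i] plus the previously appended result element.
import Mathlib
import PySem

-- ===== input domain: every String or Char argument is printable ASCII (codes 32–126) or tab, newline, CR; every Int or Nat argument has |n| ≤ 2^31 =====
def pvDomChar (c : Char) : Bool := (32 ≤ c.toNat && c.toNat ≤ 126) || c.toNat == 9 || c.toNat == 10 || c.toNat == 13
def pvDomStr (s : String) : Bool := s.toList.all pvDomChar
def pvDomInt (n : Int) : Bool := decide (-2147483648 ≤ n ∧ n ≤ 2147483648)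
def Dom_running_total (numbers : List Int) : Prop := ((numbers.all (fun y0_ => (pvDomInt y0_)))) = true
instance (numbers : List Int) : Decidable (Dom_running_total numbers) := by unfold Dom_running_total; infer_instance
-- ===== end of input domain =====

-- B computes running totals by divide and conquer (split at the midpoint, recurse,
-- shift the right half by the left half's final total) instead of A's single
-- incremental pass that back-references the previously appended result element;
-- objective: alternative.


-- ===== PORT A =====
-- 'for i in range(len(numbers)): if not result: append numbers[i] else append numbers[i] + result[i-1]'
def running_total (numbers : List Int) : List Int :=
  (PySem.List.pyRange 0 (numbers.length : Int) 1).foldl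
    (fun result i =>
      if result = [] then result ++ [PySem.List.pyGetD numbers i 0]
      else result ++ [PySem.List.pyGetD numbers i 0 + PySem.List.pyGetD result (i - 1) 0])
    []

-- ===== PORT B =====
-- 'if len <= 1: return numbers[:]; mid = len//2; left = rt(numbers[:mid]); right = rt(numbers[mid:]);
--  offset = left[-1]; return left + [offset + t for t in right]'
-- (left[-1] is ported as pyGetD with default 0; left is nonempty here since mid ≥ 1, so the default is never used)
def rtDC (fuel : Nat) (xs : List Int) : List Int :=
  match fuel with
  | 0 => []  -- unreachable: running_total_alt supplies fuel = length, which each split strictly decreases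
  | f + 1 =>
    if xs.length ≤ 1 then PySem.List.slice xs none none
    else
      let mid : Int := PySem.Int.floordiv (xs.length : Int) 2
      let left := rtDC f (PySem.List.slice xs none (some mid))
      let right := rtDC f (PySem.List.slice xs (some mid) none)
      let offset := PySem.List.pyGetD left (-1) 0
      left ++ right.map (fun t => offset + t)

def running_total_alt (numbers : List Int) : List Int := rtDC numbers.length numbers

-- ===== PRECONDITION & SPEC =====
def Spec_running_total (numbers : List Int) (out : List Int) : Prop := out = running_total_alt numbers
instance (numbers : List Int) (out : List Int) : Decidable (Spec_running_total numbers out) := by unfold Spec_running_total; infer_instance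

-- ===== CLAIM (what is proved, stated in full; the proofs are below) =====
def Claim_equal_running_total : Prop := ∀ (numbers : List Int), Dom_running_total numbers → Spec_running_total numbers (running_total numbers)

-- ===== LEMMAS AND PROOFS =====

-- common normal form: the list of prefix sums (take (j+1)).sum for j < k
def prefL (numbers : List Int) (k : Nat) : List Int :=
  (List.range k).map (fun j => (numbers.take (j + 1)).sum)

theorem length_prefL (numbers : List Int) (k : Nat) : (prefL numbers k).length = k := by
  simp [prefL]

theorem prefL_succ (numbers : List Int) (k : Nat) :
    prefL numbers (k + 1) = prefL numbers k ++ [(numbers.take (k + 1)).sum] := by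
  simp [prefL, List.range_succ]

theorem prefL_take (numbers : List Int) (m : Nat) :
    prefL (numbers.take m) m = prefL numbers m := by
  unfold prefL
  apply List.map_congr_left
  intro j hj
  rw [List.mem_range] at hj
  rw [List.take_take, min_eq_left (by omega)]

theorem getLast_prefL (numbers : List Int) (m : Nat) (hm : 0 < m)
    (h : prefL numbers m ≠ []) :
    (prefL numbers m).getLast h = (numbers.take m).sum := by
  rw [List.getLast_eq_getElem]
  simp only [prefL, List.getElem_map, List.getElem_range, List.length_map, List.length_range]
  congr 2
  omega

theorem prefL_split (numbers : List Int) (m k : Nat) :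
    prefL numbers (m + k)
      = prefL numbers m
        ++ (prefL (numbers.drop m) k).map (fun t => (numbers.take m).sum + t) := by
  unfold prefL
  rw [List.range_add, List.map_append, List.map_map, List.map_map]
  congr 1
  apply List.map_congr_left
  intro j hj
  simp only [Function.comp]
  rw [show m + j + 1 = m + (j + 1) from by omega, List.take_add, List.sum_append]

theorem rtDC_eq_prefL (f : Nat) : ∀ xs : List Int, xs.length ≤ f →
    rtDC f xs = prefL xs xs.length := by
  induction f with
  | zero =>
    intro xs h
    have : xs = [] := List.eq_nil_of_length_eq_zero (by omega)
    subst this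
    simp [rtDC, prefL]
  | succ f ih =>
    intro xs h
    rw [rtDC]
    by_cases h1 : xs.length ≤ 1
    · rw [if_pos h1, PySem.List.slice_none_none]
      match xs, h1 with
      | [], _ => simp [prefL]
      | [a], _ => simp [prefL]
    · rw [if_neg h1]
      have hmid : PySem.Int.floordiv (xs.length : Int) 2 = ((xs.length / 2 : Nat) : Int) := by
        exact_mod_cast PySem.Int.floordiv_natCast xs.length 2
      simp only [hmid, PySem.List.slice_to_natCast, PySem.List.slice_from_natCast]
      set m := xs.length / 2 with hm
      have hm1 : 1 ≤ m := by omega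
      have hmlt : m < xs.length := by omega
      have hlenT : (xs.take m).length = m := by simp; omega
      have hlenD : (xs.drop m).length = xs.length - m := by simp
      rw [ih (xs.take m) (by omega), ih (xs.drop m) (by omega), hlenT, hlenD,
        prefL_take]
      have hne : prefL xs m ≠ [] := by
        intro hc
        have := length_prefL xs m
        rw [hc] at this; simp at this; omega
      simp only [PySem.List.pyGetD_neg_one (prefL xs m) 0 hne,
        getLast_prefL xs m hm1 hne]
      rw [← prefL_split xs m (xs.length - m)]
      congr 1
      omega

theorem alt_eq_prefL (numbers : List Int) :
    running_total_alt numbers = prefL numbers numbers.length :=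
  rtDC_eq_prefL numbers.length numbers (le_refl _)

theorem fold_prefix (numbers : List Int) :
    ∀ k : Nat, k ≤ numbers.length →
      (PySem.List.pyRange 0 (k : Int) 1).foldl
        (fun result i =>
          if result = [] then result ++ [PySem.List.pyGetD numbers i 0]
          else result ++ [PySem.List.pyGetD numbers i 0 + PySem.List.pyGetD result (i - 1) 0])
        [] = prefL numbers k := by
  intro k
  induction k with
  | zero => intro _; simp [PySem.List.pyRange_one_eq_nil, prefL]
  | succ k ih =>
    intro hk
    have hk' : k ≤ numbers.length := Nat.le_of_succ_le hk
    have hklt : k < numbers.length := hk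
    have hrange : PySem.List.pyRange 0 ((k + 1 : Nat) : Int) 1
        = PySem.List.pyRange 0 (k : Int) 1 ++ [(k : Int)] := by
      push_cast
      exact PySem.List.pyRange_one_succ_right (by positivity)
    rw [hrange, List.foldl_append, ih hk', List.foldl_cons, List.foldl_nil]
    have hget : PySem.List.pyGetD numbers (k : Int) 0 = numbers[k] := by
      rw [PySem.List.pyGetD_natCast]
      simp [List.getD_eq_getElem?_getD, hklt]
    have htake : numbers.take (k + 1) = numbers.take k ++ [numbers[k]] := by
      rw [List.take_add_one]
      simp [hklt]
    rcases Nat.eq_zero_or_pos k with hk0 | hkpos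
    · subst hk0
      have h0 : PySem.List.pyGetD numbers 0 0 = numbers[0] := by exact_mod_cast hget
      simp [prefL, h0, htake]
    · have hne : prefL numbers k ≠ [] := by
        intro h
        have := length_prefL numbers k
        rw [h] at this; simp at this; omega
      rw [if_neg hne]
      have hidx : ((k : Int) - 1) = ((k - 1 : Nat) : Int) := by omega
      have hlast : PySem.List.pyGetD (prefL numbers k) ((k : Int) - 1) 0
          = (numbers.take k).sum := by
        rw [hidx, PySem.List.pyGetD_natCast]
        have hlt : k - 1 < k := by omega
        have hkk : k - 1 + 1 = k := by omega
        have : (prefL numbers k).getD (k - 1) 0 = (numbers.take (k - 1 + 1)).sum := by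
          simp [prefL, List.getD_eq_getElem?_getD, hlt]
        rw [this, hkk]
      have hsum : (numbers.take (k + 1)).sum = (numbers.take k).sum + numbers[k] := by
        rw [htake, List.sum_append]; simp
      rw [hlast, prefL_succ, hget, hsum]
      simp [Int.add_comm]

-- ===== VERDICT (by name: the statement is the Claim_ definition above) =====
theorem running_total_spec : Claim_equal_running_total := by
  intro numbers _
  unfold Spec_running_total running_total
  rw [alt_eq_prefL numbers]
  have := fold_prefix numbers numbers.length (le_refl _)
  simpa using this
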